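-- pv_equiv track=rewrite | github.com/alexandraback/datacollection | solutions_5686275109552128_0/Python/benfei/infinite_house_of_pancakes.py | lazy_head_server
-- ===== SOURCE A (Python) =====
-- def lazy_head_server(Parray):
--     Parray = sorted(Parray, reverse=True)
--     Pmax = Parray[0]
--     abs_min_time = Pmax
--     for p in range(Pmax, 0, -1):
--         min_time = p
--         for i in range(len(Parray)):
--             if Parray[i] <= p:
--                 break
--             min_time += (Parray[i] - 1) // p
--         if min_time < abs_min_time:
--             abs_min_time = min_time
--
--     return abs_min_time
-- ===== SOURCE B (Python) =====
-- def lazy_head_server(Parray):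
--     # Count-array + harmonic enumeration: O(N + Pmax log Pmax) instead of A's O(Pmax * N).
--     Pmax = max(Parray)
--     best = Pmax  # no-split baseline
--     if Pmax <= 0:
--         return best
--     # cnt[m] = number of plates v with v - 1 == m, for plates needing more than one minute
--     cnt = [0] * (Pmax + 1)
--     for v in Parray:
--         if v >= 2:
--             cnt[v - 1] += 1
--     # geq[x] = number of plates v with v - 1 >= x
--     geq = [0] * (Pmax + 2)
--     for x in range(Pmax, 0, -1):
--         geq[x] = geq[x + 1] + cnt[x]
--     # cost of serving with target height p: p minutes of eating + splits
--     for p in range(1, Pmax + 1):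
--         cost = p
--         for k in range(p, Pmax, p):
--             cost += geq[k]
--         if cost < best:
--             best = cost
--     return best
-- ===== Notes on version B (the rewrite author's own statement) =====
-- stated objective: faster
-- what changed: Instead of sorting and rescanning the plate list for every candidate height p (A), B builds a count array and its suffix sums once and obtains each candidate's split cost by summing the suffix counts at the multiples of p, a harmonic-series enumeration.
import Mathlib
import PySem

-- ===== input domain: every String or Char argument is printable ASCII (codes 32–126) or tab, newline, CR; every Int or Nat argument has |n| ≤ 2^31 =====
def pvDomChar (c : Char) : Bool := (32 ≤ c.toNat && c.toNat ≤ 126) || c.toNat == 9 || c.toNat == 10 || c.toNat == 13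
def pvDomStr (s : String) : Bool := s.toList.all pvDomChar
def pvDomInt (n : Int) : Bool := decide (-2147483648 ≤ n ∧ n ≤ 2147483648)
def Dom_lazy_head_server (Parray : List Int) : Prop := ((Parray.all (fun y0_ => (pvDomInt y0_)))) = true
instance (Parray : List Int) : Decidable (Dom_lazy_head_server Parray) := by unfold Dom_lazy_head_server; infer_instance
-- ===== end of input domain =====

-- B replaces A's per-candidate rescan of the plate list by a count array plus harmonic
-- enumeration of multiples: O(N + Pmax log Pmax) instead of A's O(Pmax * N) (objective: faster).

-- ===== PORT A =====
-- inner loop 'for i in range(len(Parray)): if Parray[i] <= p: break; min_time += (Parray[i]-1)//p'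
-- ported as structural recursion over the (sorted) list because of the 'break'.
def pvInnerA (p : Int) (min_time : Int) : List Int → Int
  | [] => min_time
  | v :: rest =>
      if v ≤ p then min_time
      else pvInnerA p (min_time + PySem.Int.floordiv (v - 1) p) rest

def lazy_head_server (Parray : List Int) : Int :=
  let Psorted := PySem.List.sorted Parray (fun v => v) true
  let Pmax := PySem.List.pyGetD Psorted 0 0   -- Parray[0]; IndexError on [] excluded by Pre_
  (PySem.List.pyRange Pmax 0 (-1)).foldl
    (fun abs_min_time p =>
      let min_time := pvInnerA p p Psorted
      if min_time < abs_min_time then min_time else abs_min_time) Pmax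

-- ===== PORT B =====
-- B's Python arrays cnt/geq are Lean Arrays; B only indexes them at nonnegative
-- in-range positions, where getD/setIfInBounds at .toNat are exact for Python's cnt[i] / cnt[i]=v.
def pvAget (a : Array Int) (i : Int) : Int := a.getD i.toNat 0
def pvAset (a : Array Int) (i : Int) (v : Int) : Array Int := a.setIfInBounds i.toNat v

-- 'if v >= 2: cnt[v-1] += 1'
def pvCntStep (cnt : Array Int) (v : Int) : Array Int :=
  if 2 ≤ v then pvAset cnt (v - 1) (pvAget cnt (v - 1) + 1) else cnt

-- 'geq[x] = geq[x+1] + cnt[x]'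
def pvGeqStep (cnt : Array Int) (geq : Array Int) (x : Int) : Array Int :=
  pvAset geq x (pvAget geq (x + 1) + pvAget cnt x)

def lazy_head_server_alt (Parray : List Int) : Int :=
  let Pmax := (PySem.List.max? Parray (fun v => v)).getD 0   -- max([]) raises: excluded by Pre_
  if Pmax ≤ 0 then Pmax
  else
    let cnt := Parray.foldl pvCntStep (Array.replicate (Pmax + 1).toNat 0)
    let geq := (PySem.List.pyRange Pmax 0 (-1)).foldl (pvGeqStep cnt)
      (Array.replicate (Pmax + 2).toNat 0)
    (PySem.List.pyRange 1 (Pmax + 1) 1).foldl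
      (fun best p =>
        let cost := (PySem.List.pyRange p Pmax p).foldl
          (fun c k => c + pvAget geq k) p
        if cost < best then cost else best) Pmax

-- ===== PRECONDITION & SPEC =====
-- A raises IndexError on [] (and B's max([]) raises too): the empty list is excluded.
def Pre_lazy_head_server (Parray : List Int) : Prop := Parray ≠ []
instance (Parray : List Int) : Decidable (Pre_lazy_head_server Parray) := by
  unfold Pre_lazy_head_server; infer_instance

def pvWitness_lazy_head_server : List Int := [3, 1, 2]

def Spec_lazy_head_server (Parray : List Int) (out : Int) : Prop := out = lazy_head_server_alt Parray
instance (Parray : List Int) (out : Int) : Decidable (Spec_lazy_head_server Parray out) := by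
  unfold Spec_lazy_head_server; infer_instance

-- ===== CLAIM (what is proved, stated in full; the proofs are below) =====
def Claim_equal_lazy_head_server : Prop := ∀ (Parray : List Int), Dom_lazy_head_server Parray → Pre_lazy_head_server Parray → Spec_lazy_head_server Parray (lazy_head_server Parray)

-- ===== LEMMAS AND PROOFS =====

-- reference value: serving cost of candidate height p over the plate list
def pvContrib (p v : Int) : Int := if p < v then PySem.Int.floordiv (v - 1) p else 0
def pvCost (P : List Int) (p : Int) : Int := p + (P.map (pvContrib p)).sum

-- suffix sums of cnt
def pvG (cnt : Array Int) (Pmax x : Int) : Int :=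
  ((PySem.List.pyRange x (Pmax + 1) 1).map (fun m => pvAget cnt m)).sum

theorem pvInnerA_eq (p : Int) (S : List Int) (hs : S.Pairwise (fun a b => b ≤ a)) (acc : Int) :
    pvInnerA p acc S = acc + (S.map (pvContrib p)).sum := by
  induction S generalizing acc with
  | nil => simp [pvInnerA]
  | cons v rest ih =>
    simp only [pvInnerA, List.map_cons, List.sum_cons]
    rcases List.pairwise_cons.mp hs with ⟨hle, hrest⟩
    by_cases hv : v ≤ p
    · simp only [if_pos hv]
      have h0 : ∀ w ∈ rest, pvContrib p w = 0 := by
        intro w hw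
        have := hle w hw
        simp [pvContrib]; omega
      have : (rest.map (pvContrib p)).sum = 0 := by
        rw [List.sum_eq_zero]; intro x hx
        rcases List.mem_map.mp hx with ⟨w, hw, rfl⟩; exact h0 w hw
      simp [pvContrib, hv, this]
    · simp only [if_neg hv]
      rw [ih hrest]
      have : pvContrib p v = PySem.Int.floordiv (v - 1) p := by simp [pvContrib]; omega
      rw [this]; ring

theorem pvSum_swap {α β : Type} (K : List α) (P : List β) (f : α → β → Int) :
    (K.map (fun k => (P.map (f k)).sum)).sum = (P.map (fun v => (K.map (fun k => f k v)).sum)).sum := by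
  induction K with
  | nil => simp
  | cons k K ih =>
    simp only [List.map_cons, List.sum_cons, ih]
    rw [← PySem.List.sum_map_add_int]

theorem pvCount_range (n e : Nat) :
    (List.range n).countP (fun k => decide (k < e)) = min n e := by
  induction n with
  | zero => simp
  | succ n ih =>
    rw [List.range_succ, List.countP_append, ih]
    by_cases h : n < e <;> simp [h] <;> omega

theorem pvHead_eq_max (P : List Int) (h : P ≠ []) :
    PySem.List.pyGetD (PySem.List.sorted P (fun v => v) true) 0 0
      = (PySem.List.max? P (fun v => v)).getD 0 := by
  obtain ⟨m, hm⟩ : ∃ m, PySem.List.max? P (fun v => v) = some m := by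
    rcases e : PySem.List.max? P (fun v => v) with _ | m
    · exact absurd ((PySem.List.max?_eq_none_iff P _).mp e) h
    · exact ⟨m, rfl⟩
  have hperm := PySem.List.sorted_perm P (fun v => v) true
  have hpair := PySem.List.sorted_pairwise_rev P (fun v => v)
  rcases e : PySem.List.sorted P (fun v => v) true with _ | ⟨hd, tl⟩
  · rw [e] at hperm; exact absurd hperm.symm.eq_nil h
  · rw [e] at hperm hpair
    have hhd : hd ≤ m := PySem.List.max?_isMax hm hd (hperm.mem_iff.mp (by simp))
    have hmem : m ∈ hd :: tl := hperm.mem_iff.mpr (PySem.List.max?_mem hm)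
    have hle : m ≤ hd := by
      rcases List.mem_cons.mp hmem with rfl | hmt
      · exact le_refl _
      · exact (List.pairwise_cons.mp hpair).1 m hmt
    have : hd = m := le_antisymm hhd hle
    simp [PySem.List.pyGetD_zero_cons, this, hm]

theorem pvMinFold_assoc (l : List Int) (i x : Int) :
    l.foldl min (min i x) = min (l.foldl min i) x := by
  induction l generalizing i with
  | nil => rfl
  | cons y ys ih =>
    simp only [List.foldl_cons]
    rw [show min (min i x) y = min (min i y) x by rw [min_assoc, min_assoc, min_comm x y], ih]

theorem pvMinFold_reverse (l : List Int) (i : Int) :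
    l.reverse.foldl min i = l.foldl min i := by
  induction l generalizing i with
  | nil => rfl
  | cons x xs ih =>
    rw [List.reverse_cons, List.foldl_append, List.foldl_cons, List.foldl_nil, ih,
      List.foldl_cons, ← pvMinFold_assoc]

theorem pvFold_rev (c : Int → Int) (a b i : Int) :
    (PySem.List.pyRange a b (-1)).foldl (fun acc p => if c p < acc then c p else acc) i
      = (PySem.List.pyRange (b + 1) (a + 1) 1).foldl (fun acc p => if c p < acc then c p else acc) i := by
  rw [PySem.List.pyRange_neg_one_eq_reverse]
  have hf : (fun acc p => if c p < acc then c p else acc) = fun acc p => min acc (c p) := by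
    funext acc p; rcases lt_trichotomy (c p) acc with h | h | h <;> simp [min_def] <;> omega
  rw [hf, show ∀ (l : List Int) (j : Int), l.foldl (fun acc p => min acc (c p)) j = (l.map c).foldl min j
      from fun l j => (List.foldl_map (f := c) (g := min)).symm,
    show ∀ (l : List Int) (j : Int), l.foldl (fun acc p => min acc (c p)) j = (l.map c).foldl min j
      from fun l j => (List.foldl_map (f := c) (g := min)).symm,
    List.map_reverse, pvMinFold_reverse]

theorem pvAget_replicate (n : Nat) (i : Int) : pvAget (Array.replicate n (0:Int)) i = 0 := by
  unfold pvAget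
  rw [Array.getD_eq_getD_getElem?, Array.getElem?_replicate]
  split_ifs <;> rfl

theorem pvAset_size (a : Array Int) (i v : Int) : (pvAset a i v).size = a.size := by
  unfold pvAset; rw [Array.size_setIfInBounds]

theorem pvAget_pvAset (a : Array Int) (i j v : Int) (hi : i.toNat < a.size) :
    pvAget (pvAset a i v) j = if j.toNat = i.toNat then v else pvAget a j := by
  unfold pvAget pvAset
  rw [Array.getD_eq_getD_getElem?, Array.getElem?_setIfInBounds, Array.getD_eq_getD_getElem?]
  by_cases h : j.toNat = i.toNat
  · rw [if_pos h, if_pos h.symm, if_pos hi]; rfl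
  · rw [if_neg h, if_neg (fun e => h e.symm)]

theorem pvCnt_getD (Pmax : Int) (l : List Int) (cnt0 : Array Int)
    (hlen : cnt0.size = (Pmax + 1).toNat) (hub : ∀ v ∈ l, v ≤ Pmax)
    (m : Int) (hm0 : 0 ≤ m) (hm : m ≤ Pmax) :
    pvAget (l.foldl pvCntStep cnt0) m
      = pvAget cnt0 m + (l.countP (fun v => decide (v = m + 1 ∧ 2 ≤ v)) : Int) := by
  induction l generalizing cnt0 with
  | nil => simp
  | cons v rest ih =>
    have hvP : v ≤ Pmax := hub v (by simp)
    have hub' : ∀ w ∈ rest, w ≤ Pmax := fun w hw => hub w (by simp [hw])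
    simp only [List.foldl_cons, List.countP_cons]
    by_cases hv : 2 ≤ v
    · have hstep : pvCntStep cnt0 v = pvAset cnt0 (v - 1) (pvAget cnt0 (v - 1) + 1) := by
        simp [pvCntStep, hv]
      have hlen' : (pvCntStep cnt0 v).size = (Pmax + 1).toNat := by
        rw [hstep, pvAset_size, hlen]
      rw [ih _ hlen' hub']
      have hnlt : (v - 1).toNat < cnt0.size := by rw [hlen]; omega
      rw [hstep, pvAget_pvAset cnt0 _ _ _ hnlt]
      by_cases heq : m.toNat = (v - 1).toNat
      · have hvm : v = m + 1 := by omega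
        have hgm : m = v - 1 := by omega
        rw [if_pos heq, hgm]
        simp [hvm]
        omega
      · have hne : ¬ (v = m + 1 ∧ 2 ≤ v) := by omega
        rw [if_neg heq]
        simp [hne]
    · have hstep : pvCntStep cnt0 v = cnt0 := by simp [pvCntStep, hv]
      rw [hstep, ih _ hlen hub']
      have hne : ¬ (v = m + 1 ∧ 2 ≤ v) := by omega
      simp [hne]

theorem pvG_rec (cnt : Array Int) (Pmax x : Int) (h : x ≤ Pmax) :
    pvG cnt Pmax x = pvAget cnt x + pvG cnt Pmax (x + 1) := by
  rw [pvG, PySem.List.pyRange_one_cons (by omega)]; simp [pvG]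

theorem pvG_top (cnt : Array Int) (Pmax x : Int) (h : Pmax + 1 ≤ x) :
    pvG cnt Pmax x = 0 := by
  rw [pvG, PySem.List.pyRange_one_eq_nil (by omega)]; simp

theorem pvGeq_inv (cnt : Array Int) (Pmax : Int) (a : Nat) (ha : (a : Int) ≤ Pmax)
    (g0 : Array Int) (hlen : g0.size = (Pmax + 2).toNat)
    (hg : ∀ x : Int, 0 ≤ x → x ≤ Pmax + 1 →
      pvAget g0 x = if (a : Int) < x then pvG cnt Pmax x else 0) :
    ∀ x : Int, 0 ≤ x → x ≤ Pmax + 1 →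
      pvAget ((PySem.List.pyRange (a : Int) 0 (-1)).foldl (pvGeqStep cnt) g0) x
        = if 0 < x then pvG cnt Pmax x else 0 := by
  induction a generalizing g0 with
  | zero =>
    intro x hx0 hx
    rw [PySem.List.pyRange_neg_one_eq_nil (by omega), List.foldl_nil]
    exact hg x hx0 hx
  | succ a ih =>
    have hc : ((a + 1 : Nat) : Int) = (a : Int) + 1 := by push_cast; ring
    have ha1 : (a : Int) + 1 ≤ Pmax := by exact_mod_cast ha
    rw [hc, PySem.List.pyRange_neg_one_cons (by omega), show (a:Int)+1-1 = (a:Int) from by ring, List.foldl_cons]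
    have ha' : (a : Int) ≤ Pmax := by omega
    have hlen1 : (pvGeqStep cnt g0 ((a : Int) + 1)).size = (Pmax + 2).toNat := by
      simp only [pvGeqStep, pvAset_size, hlen]
    refine ih ha' _ hlen1 ?_
    intro x hx0 hx
    have hnlt : ((a : Int) + 1).toNat < g0.size := by rw [hlen]; omega
    simp only [pvGeqStep]
    rw [pvAget_pvAset g0 _ _ _ hnlt]
    by_cases heq : x.toNat = ((a : Int) + 1).toNat
    · rw [if_pos heq]
      have hg2 : pvAget g0 ((a : Int) + 1 + 1) = pvG cnt Pmax ((a : Int) + 2) := by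
        rw [hg ((a : Int) + 1 + 1) (by omega) (by omega)]
        rw [if_pos (by omega)]
        congr 1
      rw [hg2]
      have hx1 : x = (a : Int) + 1 := by omega
      rw [if_pos (by omega), hx1,
        pvG_rec cnt Pmax ((a : Int) + 1) (by omega),
        show (a : Int) + 1 + 1 = (a : Int) + 2 from by ring]
      ring
    · rw [if_neg heq]
      rw [hg x hx0 hx, hc]
      have hiff : ((a : Int) + 1 < x) ↔ ((a : Int) < x) := by omega
      rw [if_congr hiff rfl rfl]

theorem pvMult_count (Pmax p v : Int) (hp : 0 < p) (hpP : p ≤ Pmax) (hv : v ≤ Pmax) :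
    (((PySem.List.pyRange p Pmax p).countP (fun k => decide (k < v))) : Int) = pvContrib p v := by
  rw [PySem.List.pyRange_of_pos p Pmax hp, List.countP_map]
  by_cases hvp : p < v
  · have hif : (if p < Pmax then ((Pmax - p + p - 1) / p).toNat else 0)
        = ((Pmax - 1) / p).toNat := by
      rw [if_pos (by omega), show Pmax - p + p - 1 = Pmax - 1 from by ring]
    rw [hif]
    set e : Int := (v - 1) / p with he
    have he0 : 0 ≤ e := Int.ediv_nonneg (by omega) (by omega)
    have hen : e ≤ (Pmax - 1) / p := Int.ediv_le_ediv hp (by omega)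
    have hN0 : (0:Int) ≤ (Pmax - 1) / p := Int.ediv_nonneg (by omega) (by omega)
    have hcongr : ∀ k ∈ List.range ((Pmax - 1) / p).toNat,
        (((fun k => decide (k < v)) ∘ fun (k : Nat) => p + p * (k : Int)) k = true
          ↔ decide (k < e.toNat) = true) := by
      intro k _
      simp only [Function.comp_apply, decide_eq_true_eq]
      have h1 : p + p * (k:Int) < v ↔ ((k:Int) + 1) * p ≤ v - 1 := by
        constructor <;> intro h <;> nlinarith
      rw [h1, ← Int.le_ediv_iff_mul_le hp, ← he]
      omega
    rw [List.countP_congr hcongr, pvCount_range]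
    have hmin : min ((Pmax - 1) / p).toNat e.toNat = e.toNat := by omega
    rw [hmin, pvContrib, if_pos hvp, PySem.Int.floordiv_eq_ediv_of_pos hp]
    omega
  · have hz : ∀ k ∈ List.range (if p < Pmax then ((Pmax - p + p - 1) / p).toNat else 0),
        ¬ (((fun k => decide (k < v)) ∘ fun (k : Nat) => p + p * (k : Int)) k = true) := by
      intro k _
      simp only [Function.comp_apply, decide_eq_true_eq]
      have : (0:Int) ≤ (k : Int) := Int.natCast_nonneg k
      nlinarith
    rw [List.countP_eq_zero.mpr hz, pvContrib, if_neg hvp]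
    rfl


theorem pvA_eq_fold (P : List Int) (h : P ≠ []) :
    lazy_head_server P =
      (PySem.List.pyRange ((PySem.List.max? P (fun v => v)).getD 0) 0 (-1)).foldl
        (fun a p => if pvCost P p < a then pvCost P p else a)
        ((PySem.List.max? P (fun v => v)).getD 0) := by
  unfold lazy_head_server
  simp only [pvHead_eq_max P h]
  congr 1
  funext a p
  rw [pvInnerA_eq p _ (PySem.List.sorted_pairwise_rev P (fun v => v)) p]
  rw [show ((PySem.List.sorted P (fun v => v) true).map (pvContrib p)).sum
      = (P.map (pvContrib p)).sum from
    ((PySem.List.sorted_perm P (fun v => v) true).map (pvContrib p)).sum_eq]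
  rfl

theorem pvSum_indicator (R : List Int) (t : Int) (h : R.Nodup) :
    (R.map (fun m => if m = t then (1:Int) else 0)).sum = if t ∈ R then 1 else 0 := by
  induction R with
  | nil => simp
  | cons m R ih =>
    rcases List.nodup_cons.mp h with ⟨hm, hR⟩
    simp only [List.map_cons, List.sum_cons, ih hR, List.mem_cons]
    by_cases he : m = t
    · subst he
      rw [if_pos rfl, if_pos (Or.inl rfl), if_neg hm]
      omega
    · rw [if_neg he, zero_add]
      by_cases ht : t ∈ R
      · rw [if_pos ht, if_pos (Or.inr ht)]
      · rw [if_neg ht, if_neg (by rintro (rfl | hh) <;> [exact he rfl; exact ht hh])]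

theorem pvGeq_getD (P : List Int) (Pmax : Int) (hP : 0 < Pmax)
    (x : Int) (hx0 : 0 ≤ x) (hx : x ≤ Pmax + 1) :
    pvAget
      ((PySem.List.pyRange Pmax 0 (-1)).foldl
        (pvGeqStep (P.foldl pvCntStep (Array.replicate (Pmax + 1).toNat 0)))
        (Array.replicate (Pmax + 2).toNat 0)) x
      = if 0 < x then pvG (P.foldl pvCntStep (Array.replicate (Pmax + 1).toNat 0)) Pmax x else 0 := by
  set cnt := P.foldl pvCntStep (Array.replicate (Pmax + 1).toNat 0)
  have hcast : ((Pmax.toNat : Nat) : Int) = Pmax := by omega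
  have hg0 : ∀ y : Int, 0 ≤ y → y ≤ Pmax + 1 →
      pvAget (Array.replicate (Pmax + 2).toNat (0:Int)) y
        = if ((Pmax.toNat : Nat) : Int) < y then pvG cnt Pmax y else 0 := by
    intro y hy0 hy
    rw [pvAget_replicate _ y, hcast]
    split_ifs with hlt
    · exact (pvG_top cnt Pmax y (by omega)).symm
    · rfl
  have H := pvGeq_inv cnt Pmax Pmax.toNat (by omega) _ (by simp) hg0 x hx0 hx
  rw [hcast] at H
  exact H

theorem pvG_eq_count (P : List Int) (Pmax : Int) (_hP : 0 < Pmax)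
    (hub : ∀ v ∈ P, v ≤ Pmax) (k : Int) (hk1 : 1 ≤ k) (_hk : k ≤ Pmax) :
    pvG (P.foldl pvCntStep (Array.replicate (Pmax + 1).toNat 0)) Pmax k
      = (P.map (fun v => if k < v then (1:Int) else 0)).sum := by
  rw [pvG]
  have h1 : ∀ m ∈ PySem.List.pyRange k (Pmax + 1) 1,
      pvAget (P.foldl pvCntStep (Array.replicate (Pmax + 1).toNat 0)) m
        = (P.map (fun v => if v = m + 1 ∧ 2 ≤ v then (1:Int) else 0)).sum := by
    intro m hm
    rcases (PySem.List.mem_pyRange_one).mp hm with ⟨hm1, hm2⟩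
    rw [pvCnt_getD Pmax P _ (by simp) hub m (by omega) (by omega)]
    rw [pvAget_replicate _ m, zero_add]
    rw [← PySem.List.sum_map_ite_one_zero (fun v => decide (v = m + 1 ∧ 2 ≤ v)) P]
    simp
  rw [List.map_congr_left h1, pvSum_swap]
  refine congrArg List.sum (List.map_congr_left ?_)
  intro v hv
  have hvP : v ≤ Pmax := hub v hv
  by_cases h2 : 2 ≤ v
  · have hmc : ∀ m ∈ PySem.List.pyRange k (Pmax + 1) 1,
        (if v = m + 1 ∧ 2 ≤ v then (1:Int) else 0) = (if m = v - 1 then (1:Int) else 0) := by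
      intro m hm
      by_cases he : m = v - 1
      · rw [if_pos he, if_pos (by omega)]
      · rw [if_neg he, if_neg (by omega)]
    rw [List.map_congr_left hmc,
      pvSum_indicator _ _ (PySem.List.nodup_pyRange_one k (Pmax + 1))]
    have hmem : (v - 1 ∈ PySem.List.pyRange k (Pmax + 1) 1) ↔ (k < v) := by
      rw [PySem.List.mem_pyRange_one]; omega
    by_cases hkv : k < v
    · rw [if_pos (hmem.mpr hkv), if_pos hkv]
    · rw [if_neg (fun hmm => hkv (hmem.mp hmm)), if_neg hkv]
  · rw [List.sum_eq_zero, if_neg (by omega)]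
    intro y hy
    rcases List.mem_map.mp hy with ⟨m, hm, rfl⟩
    simp [h2]

theorem pvB_cost (P : List Int) (Pmax : Int) (hP : 0 < Pmax)
    (hub : ∀ v ∈ P, v ≤ Pmax) (p : Int) (hp1 : 1 ≤ p) (hp : p ≤ Pmax) :
    ((PySem.List.pyRange p Pmax p).foldl
      (fun c k => c + pvAget
        ((PySem.List.pyRange Pmax 0 (-1)).foldl
          (pvGeqStep (P.foldl pvCntStep (Array.replicate (Pmax + 1).toNat 0)))
          (Array.replicate (Pmax + 2).toNat 0)) k) p)
      = pvCost P p := by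
  rw [PySem.List.foldl_add]
  have h1 : ∀ k ∈ PySem.List.pyRange p Pmax p,
      pvAget
        ((PySem.List.pyRange Pmax 0 (-1)).foldl
          (pvGeqStep (P.foldl pvCntStep (Array.replicate (Pmax + 1).toNat 0)))
          (Array.replicate (Pmax + 2).toNat 0)) k
      = (P.map (fun v => if k < v then (1:Int) else 0)).sum := by
    intro k hk
    rcases (PySem.List.mem_pyRange_iff_of_pos (by omega) k).mp hk with ⟨hk1, hk2, _⟩
    rw [pvGeq_getD P Pmax hP k (by omega) (by omega), if_pos (by omega)]
    exact pvG_eq_count P Pmax hP hub k (by omega) (by omega)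
  rw [List.map_congr_left h1, pvSum_swap]
  have h2 : ∀ v ∈ P,
      ((PySem.List.pyRange p Pmax p).map (fun k => if k < v then (1:Int) else 0)).sum
        = pvContrib p v := by
    intro v hv
    rw [show (fun k : Int => if k < v then (1:Int) else 0)
        = (fun k : Int => if (decide (k < v)) = true then (1:Int) else 0) from by
      funext k; by_cases h : k < v <;> simp [h]]
    rw [PySem.List.sum_map_ite_one_zero (fun k => decide (k < v)) _]
    exact pvMult_count Pmax p v (by omega) hp (hub v hv)
  rw [List.map_congr_left h2, pvCost]

-- ===== VERDICT (by name: the statement is the Claim_ definition above) =====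
theorem lazy_head_server_spec : Claim_equal_lazy_head_server := by
  intro P _ hne
  unfold Spec_lazy_head_server
  rw [pvA_eq_fold P hne]
  unfold lazy_head_server_alt
  set M := (PySem.List.max? P (fun v => v)).getD 0 with hM
  have hub : ∀ v ∈ P, v ≤ M := by
    intro v hv
    obtain ⟨m, hm⟩ : ∃ m, PySem.List.max? P (fun v => v) = some m := by
      rcases e : PySem.List.max? P (fun v => v) with _ | m
      · exact absurd ((PySem.List.max?_eq_none_iff P _).mp e) hne
      · exact ⟨m, rfl⟩
    rw [hM, hm]
    exact PySem.List.max?_isMax hm v hv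
  by_cases h0 : M ≤ 0
  · rw [if_pos h0, PySem.List.pyRange_neg_one_eq_nil (by omega), List.foldl_nil]
  · rw [if_neg h0, pvFold_rev (pvCost P) M 0 M, zero_add]
    show (PySem.List.pyRange 1 (M + 1) 1).foldl
        (fun acc p => if pvCost P p < acc then pvCost P p else acc) M
      = (PySem.List.pyRange 1 (M + 1) 1).foldl
        (fun best p =>
          let cost := (PySem.List.pyRange p M p).foldl
            (fun c k => c + pvAget
              ((PySem.List.pyRange M 0 (-1)).foldl
                (pvGeqStep (P.foldl pvCntStep (Array.replicate (M + 1).toNat 0)))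
                (Array.replicate (M + 2).toNat 0)) k) p
          if cost < best then cost else best) M
    apply PySem.List.foldl_congr_mem
    intro acc p hp
    rcases (PySem.List.mem_pyRange_one).mp hp with ⟨hp1, hp2⟩
    rw [pvB_cost P M (by omega) hub p (by omega) (by omega)]
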